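-- pv_equiv track=rewrite | github.com/SoccerScout-Admin/soccer-scout-11-app | backend/routes/players.py | _resolve_columns
-- ===== SOURCE A (Python) =====
-- from typing import Optional, List
--
-- _HEADER_ALIASES = {
--     "name": {"name", "player", "player name", "full name", "fullname", "athlete"},
--     # iter59: Hudl/TeamSnap exports split into First Name + Last Name.
--     "first_name": {"first name", "firstname", "first", "given name"},
--     "last_name": {"last name", "lastname", "last", "family name", "surname"},
--     "number": {"number", "no", "no.", "#", "jersey", "jersey number", "shirt", "shirt no", "uniform"},
--     "position": {"position", "pos", "pos.", "primary position", "primary pos"},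
--     # iter58: roster demographics for HS/club/college rosters
--     "birth_year": {
--         "birth year", "birthyear", "year of birth", "yob", "born", "birth",
--         # iter59: Hudl/TeamSnap full-date columns — our regex extracts the year
--         "date of birth", "dob", "birthdate", "birth date",
--     },
--     "current_grade": {"grade", "current grade", "class", "year", "school year", "level"},
--     # iter59: Hudl exports a "Grad Year" — we'll derive current_grade from it.
--     "grad_year": {"grad year", "graduation year", "class of", "graduating class"},
--     # iter59: TeamSnap exports a "Member Type" — we skip rows that aren't players.
--     "member_type": {"member type", "role", "type"},
-- }
--
-- def _normalize_header(h: str) -> str: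
--     return (h or "").strip().lower().replace("_", " ")
--
-- def _resolve_columns(fieldnames: list[str]) -> dict[str, Optional[str]]:
--     """Map our canonical fields → the actual CSV header that was used."""
--     resolved: dict[str, Optional[str]] = {k: None for k in _HEADER_ALIASES}
--     for canonical, aliases in _HEADER_ALIASES.items():
--         for actual in fieldnames or []:
--             if _normalize_header(actual) in aliases:
--                 resolved[canonical] = actual
--                 break
--     return resolved
-- ===== SOURCE B (Python) =====
-- from typing import Optional, List
--
-- _HEADER_ALIASES = {
--     "name": {"name", "player", "player name", "full name", "fullname", "athlete"},
--     "first_name": {"first name", "firstname", "first", "given name"},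
--     "last_name": {"last name", "lastname", "last", "family name", "surname"},
--     "number": {"number", "no", "no.", "#", "jersey", "jersey number", "shirt", "shirt no", "uniform"},
--     "position": {"position", "pos", "pos.", "primary position", "primary pos"},
--     "birth_year": {
--         "birth year", "birthyear", "year of birth", "yob", "born", "birth",
--         "date of birth", "dob", "birthdate", "birth date",
--     },
--     "current_grade": {"grade", "current grade", "class", "year", "school year", "level"},
--     "grad_year": {"grad year", "graduation year", "class of", "graduating class"},
--     "member_type": {"member type", "role", "type"},
-- }
--
-- def _normalize_header(h: str) -> str:
--     return (h or "").strip().lower().replace("_", " ")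
--
-- def _resolve_columns(fieldnames):
--     """Single pass over the headers via a reverse alias -> canonical index."""
--     alias_to_canonical = {}
--     for canonical, aliases in _HEADER_ALIASES.items():
--         for alias in aliases:
--             alias_to_canonical[alias] = canonical
--     resolved = {k: None for k in _HEADER_ALIASES}
--     for actual in (fieldnames or []):
--         canonical = alias_to_canonical.get(_normalize_header(actual))
--         if canonical is not None and resolved[canonical] is None:
--             resolved[canonical] = actual
--     return resolved
-- ===== Notes on version B (the rewrite author's own statement) =====
-- stated objective: faster
-- what changed: Replaces the per-canonical rescans of fieldnames (one inner scan per canonical field) by a reverse alias->canonical dict built once and a single pass over fieldnames with a first-occurrence-wins guard.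
import Mathlib
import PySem

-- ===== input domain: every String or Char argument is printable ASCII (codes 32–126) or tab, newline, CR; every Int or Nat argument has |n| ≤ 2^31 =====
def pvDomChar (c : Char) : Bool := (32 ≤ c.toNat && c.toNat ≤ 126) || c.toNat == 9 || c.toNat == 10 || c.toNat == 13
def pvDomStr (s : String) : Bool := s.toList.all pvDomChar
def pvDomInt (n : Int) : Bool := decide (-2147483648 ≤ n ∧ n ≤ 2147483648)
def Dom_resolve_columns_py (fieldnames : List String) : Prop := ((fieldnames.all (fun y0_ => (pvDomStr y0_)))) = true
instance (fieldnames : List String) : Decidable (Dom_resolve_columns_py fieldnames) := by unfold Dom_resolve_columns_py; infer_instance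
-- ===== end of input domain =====

-- B builds a reverse alias->canonical dict once and makes a single first-occurrence-wins
-- pass over fieldnames instead of A's one scan of fieldnames per canonical field (measured faster).

-- ===== PORT A =====
-- _HEADER_ALIASES: canonical -> set of aliases (sets as lists of their distinct elements)
def pvTable : List (String × List String) :=
  [("name", ["name", "player", "player name", "full name", "fullname", "athlete"]),
   ("first_name", ["first name", "firstname", "first", "given name"]),
   ("last_name", ["last name", "lastname", "last", "family name", "surname"]),
   ("number", ["number", "no", "no.", "#", "jersey", "jersey number", "shirt", "shirt no", "uniform"]),
   ("position", ["position", "pos", "pos.", "primary position", "primary pos"]),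
   ("birth_year", ["birth year", "birthyear", "year of birth", "yob", "born", "birth",
                   "date of birth", "dob", "birthdate", "birth date"]),
   ("current_grade", ["grade", "current grade", "class", "year", "school year", "level"]),
   ("grad_year", ["grad year", "graduation year", "class of", "graduating class"]),
   ("member_type", ["member type", "role", "type"])]

-- _normalize_header: (h or "").strip().lower().replace("_", " ")
def pvNormalize (h : String) : String :=
  PySem.Str.replace (PySem.Str.lower (PySem.Str.strip (if h == "" then "" else h))) "_" " "

-- A's inner 'for actual in fieldnames or []: if _normalize_header(actual) in aliases: …; break'
def pvFindMatch (aliases : List String) : List String → Option String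
  | [] => none
  | a :: rest => if aliases.contains (pvNormalize a) then some a else pvFindMatch aliases rest

-- body of A's outer loop: 'resolved[canonical] = actual; break' when the inner scan found a match
def pvStepA (fs : List String) (res : PySem.Dict String (Option String))
    (kv : String × List String) : PySem.Dict String (Option String) :=
  match pvFindMatch kv.2 fs with
  | some a => res.insert kv.1 (some a)
  | none => res

def resolve_columns_py (fieldnames : List String) : List (String × Option String) :=
  (pvTable.foldl (pvStepA fieldnames)
    (PySem.Dict.ofList (pvTable.map (fun kv => (kv.1, (none : Option String)))))).items

-- ===== PORT B =====
-- rev = {alias: canonical for canonical, aliases in _HEADER_ALIASES.items() for alias in aliases}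
def pvRevMap : PySem.Dict String String :=
  pvTable.foldl (fun d kv => kv.2.foldl (fun d a => d.insert a kv.1) d) PySem.Dict.empty

-- body of B's single pass: look the normalized header up in the reverse map; first occurrence wins
def pvStepB (res : PySem.Dict String (Option String)) (actual : String) : PySem.Dict String (Option String) :=
  match pvRevMap.get? (pvNormalize actual) with
  | some c => if (res.getD c none).isNone then res.insert c (some actual) else res
  | none => res

def resolve_columns_py_alt (fieldnames : List String) : List (String × Option String) :=
  (fieldnames.foldl pvStepB
    (PySem.Dict.ofList (pvTable.map (fun kv => (kv.1, (none : Option String)))))).items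

-- ===== PRECONDITION & SPEC =====
def Spec_resolve_columns_py (fieldnames : List String) (out : List (String × Option String)) : Prop := out = resolve_columns_py_alt fieldnames
instance (fieldnames : List String) (out : List (String × Option String)) : Decidable (Spec_resolve_columns_py fieldnames out) := by unfold Spec_resolve_columns_py; infer_instance

-- ===== CLAIM (what is proved, stated in full; the proofs are below) =====
def Claim_equal_resolve_columns_py : Prop := ∀ (fieldnames : List String), Dom_resolve_columns_py fieldnames → Spec_resolve_columns_py fieldnames (resolve_columns_py fieldnames)

-- ===== LEMMAS AND PROOFS =====

-- two entries of a list with nodup first components and equal first components coincide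
theorem pv_eq_of_fst_nodup {α β : Type} {l : List (α × β)} (h : (l.map Prod.fst).Nodup)
    {x y : α × β} (hx : x ∈ l) (hy : y ∈ l) (hxy : x.1 = y.1) : x = y := by
  induction l with
  | nil => cases hx
  | cons e l ih =>
    simp only [List.map_cons, List.nodup_cons] at h
    rcases List.mem_cons.mp hx with rfl | hx' <;> rcases List.mem_cons.mp hy with rfl | hy'
    · rfl
    · exact absurd (hxy ▸ List.mem_map_of_mem hy') h.1
    · exact absurd (hxy ▸ List.mem_map_of_mem hx') h.1
    · exact ih h.2 hx' hy'

set_option maxRecDepth 40000 in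
theorem pvTable_fst_nodup : (pvTable.map Prod.fst).Nodup := by decide

set_option maxRecDepth 40000 in
theorem pvRevMap_keys_nodup : pvRevMap.keys.Nodup := by decide

set_option maxRecDepth 40000 in
theorem pvRevMap_items : pvRevMap.items = pvTable.flatMap (fun kv => kv.2.map (fun a => (a, kv.1))) := by decide

-- the reverse map sends every alias to its canonical field
theorem pvRevMap_get_of_mem {n : String} {kv : String × List String}
    (hkv : kv ∈ pvTable) (hn : n ∈ kv.2) : pvRevMap.get? n = some kv.1 := by
  refine PySem.Dict.get?_of_mem_items _ ?_ pvRevMap_keys_nodup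
  rw [pvRevMap_items]
  exact List.mem_flatMap.mpr ⟨kv, hkv, List.mem_map_of_mem hn⟩

theorem pvRevMap_none {n : String} (h : pvRevMap.get? n = none)
    {kv : String × List String} (hkv : kv ∈ pvTable) : n ∉ kv.2 := by
  intro hn
  rw [pvRevMap_get_of_mem hkv hn] at h
  cases h

theorem pv_state_keys_nodup {g : String → Option String} :
    (PySem.Dict.mk (pvTable.map (fun kv => (kv.1, g kv.1)))).keys.Nodup := by
  show ((pvTable.map (fun kv => (kv.1, g kv.1))).map Prod.fst).Nodup
  simpa using pvTable_fst_nodup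

theorem pv_getD_state (g : String → Option String) {c : String}
    (hc : c ∈ pvTable.map Prod.fst) :
    (PySem.Dict.mk (pvTable.map (fun kv => (kv.1, g kv.1)))).getD c none = g c := by
  obtain ⟨kv, hkv, rfl⟩ := List.mem_map.mp hc
  refine PySem.Dict.getD_of_mem_items _ ?_ pv_state_keys_nodup none
  exact List.mem_map_of_mem hkv

theorem pv_insert_state (g : String → Option String) {c : String} (v : Option String)
    (hc : c ∈ pvTable.map Prod.fst) :
    (PySem.Dict.mk (pvTable.map (fun kv => (kv.1, g kv.1)))).insert c v
      = PySem.Dict.mk (pvTable.map (fun kv => (kv.1, if kv.1 = c then v else g kv.1))) := by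
  apply PySem.Dict.ext
  have hcont : (PySem.Dict.mk (pvTable.map (fun kv => (kv.1, g kv.1)))).contains c = true := by
    rw [PySem.Dict.contains_iff_mem_keys]
    show c ∈ (pvTable.map (fun kv => (kv.1, g kv.1))).map Prod.fst
    simpa using hc
  rw [PySem.Dict.items_insert_of_contains _ _ hcont]
  show (pvTable.map (fun kv => (kv.1, g kv.1))).map _ = _
  rw [List.map_map]
  show _ = pvTable.map (fun kv => (kv.1, if kv.1 = c then v else g kv.1))
  apply List.map_congr_left
  intro kv _
  by_cases h : kv.1 = c
  · simp [h]
  · simp [h]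

-- B's single pass, characterized: each canonical ends at (previous value).or (first match)
theorem pvB_loop (fs : List String) : ∀ (g : String → Option String),
    fs.foldl pvStepB (PySem.Dict.mk (pvTable.map (fun kv => (kv.1, g kv.1))))
    = PySem.Dict.mk (pvTable.map (fun kv => (kv.1, (g kv.1).or (pvFindMatch kv.2 fs)))) := by
  induction fs with
  | nil =>
    intro g
    rw [List.foldl_nil]
    refine congrArg PySem.Dict.mk (List.map_congr_left ?_)
    intro kv _
    simp [pvFindMatch]
  | cons a fs ih =>
    intro g
    rw [List.foldl_cons]
    rcases h : pvRevMap.get? (pvNormalize a) with _ | c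
    · have hstep : pvStepB (PySem.Dict.mk (pvTable.map (fun kv => (kv.1, g kv.1)))) a
          = PySem.Dict.mk (pvTable.map (fun kv => (kv.1, g kv.1))) := by
        unfold pvStepB
        rw [h]
      conv_lhs => rw [hstep, ih g]
      refine congrArg PySem.Dict.mk (List.map_congr_left ?_)
      intro kv hkv
      have hni : pvNormalize a ∉ kv.2 := pvRevMap_none h hkv
      simp [pvFindMatch, hni]
    · obtain ⟨kv₀, hkv₀, hm₀⟩ : ∃ kv ∈ pvTable, (pvNormalize a, c) ∈ kv.2.map (fun x => (x, kv.1)) := by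
        have := PySem.Dict.mem_items_of_get?_eq_some _ h
        rw [pvRevMap_items] at this
        exact List.mem_flatMap.mp this
      obtain ⟨x, hx, hxe⟩ := List.mem_map.mp hm₀
      have hxn : x = pvNormalize a := congrArg Prod.fst hxe
      have hcc : kv₀.1 = c := congrArg Prod.snd hxe
      subst hcc
      have hna : pvNormalize a ∈ kv₀.2 := hxn ▸ hx
      have hc : kv₀.1 ∈ pvTable.map Prod.fst := List.mem_map_of_mem hkv₀
      have hget := pv_getD_state g hc
      have hnotmem : ∀ kv ∈ pvTable, kv.1 ≠ kv₀.1 → pvNormalize a ∉ kv.2 := by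
        intro kv hkv he hm
        have h2 := pvRevMap_get_of_mem hkv hm
        rw [h] at h2
        exact he (Option.some.inj h2.symm)
      rcases hgc : g kv₀.1 with _ | v
      · have hstep : pvStepB (PySem.Dict.mk (pvTable.map (fun kv => (kv.1, g kv.1)))) a
            = (PySem.Dict.mk (pvTable.map (fun kv => (kv.1, g kv.1)))).insert kv₀.1 (some a) := by
          unfold pvStepB
          rw [h]
          simp [hget, hgc]
        conv_lhs => rw [hstep, pv_insert_state g (some a) hc,
            ih (fun k => if k = kv₀.1 then some a else g k)]
        refine congrArg PySem.Dict.mk (List.map_congr_left ?_)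
        intro kv hkv
        by_cases he : kv.1 = kv₀.1
        · have hkve : kv = kv₀ := pv_eq_of_fst_nodup pvTable_fst_nodup hkv hkv₀ he
          subst hkve
          simp [pvFindMatch, hna, hgc]
        · have h1 := hnotmem kv hkv he
          simp [pvFindMatch, h1, he]
      · have hstep : pvStepB (PySem.Dict.mk (pvTable.map (fun kv => (kv.1, g kv.1)))) a
            = PySem.Dict.mk (pvTable.map (fun kv => (kv.1, g kv.1))) := by
          unfold pvStepB
          rw [h]
          simp [hget, hgc]
        conv_lhs => rw [hstep, ih g]
        refine congrArg PySem.Dict.mk (List.map_congr_left ?_)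
        intro kv hkv
        by_cases he : kv.1 = kv₀.1
        · have hkve : kv = kv₀ := pv_eq_of_fst_nodup pvTable_fst_nodup hkv hkv₀ he
          subst hkve
          simp [pvFindMatch, hna, hgc]
        · have h1 := hnotmem kv hkv he
          simp [pvFindMatch, h1]

-- A's canonical-by-canonical loop, characterized the same way
theorem pvA_loop (fs : List String) : ∀ (l₁ : List (String × List String))
    (g : String → Option String), (∀ e ∈ l₁, e ∈ pvTable) →
    l₁.foldl (pvStepA fs) (PySem.Dict.mk (pvTable.map (fun kv => (kv.1, g kv.1))))
    = PySem.Dict.mk (pvTable.map (fun kv => (kv.1,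
        if l₁.any (fun e => e.1 == kv.1) then (pvFindMatch kv.2 fs).or (g kv.1) else g kv.1))) := by
  intro l₁
  induction l₁ with
  | nil =>
    intro g _
    rfl
  | cons e l₁ ih =>
    intro g hsub
    have he : e ∈ pvTable := hsub e (List.mem_cons_self ..)
    have hc : e.1 ∈ pvTable.map Prod.fst := List.mem_map_of_mem he
    rw [List.foldl_cons]
    rcases hf : pvFindMatch e.2 fs with _ | a
    · have hstep : pvStepA fs (PySem.Dict.mk (pvTable.map (fun kv => (kv.1, g kv.1)))) e
          = PySem.Dict.mk (pvTable.map (fun kv => (kv.1, g kv.1))) := by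
        unfold pvStepA
        rw [hf]
      conv_lhs => rw [hstep, ih g (fun x hx => hsub x (List.mem_cons_of_mem _ hx))]
      refine congrArg PySem.Dict.mk (List.map_congr_left ?_)
      intro kv hkv
      rw [List.any_cons]
      by_cases heq : e.1 = kv.1
      · have hkve : kv = e := pv_eq_of_fst_nodup pvTable_fst_nodup hkv he heq.symm
        subst hkve
        simp [hf]
      · have h2 : (e.1 == kv.1) = false := by simp [heq]
        rw [h2, Bool.false_or]
    · have hstep : pvStepA fs (PySem.Dict.mk (pvTable.map (fun kv => (kv.1, g kv.1)))) e
          = (PySem.Dict.mk (pvTable.map (fun kv => (kv.1, g kv.1)))).insert e.1 (some a) := by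
        unfold pvStepA
        rw [hf]
      conv_lhs => rw [hstep, pv_insert_state g (some a) hc,
          ih (fun k => if k = e.1 then some a else g k)
             (fun x hx => hsub x (List.mem_cons_of_mem _ hx))]
      refine congrArg PySem.Dict.mk (List.map_congr_left ?_)
      intro kv hkv
      rw [List.any_cons]
      by_cases heq : e.1 = kv.1
      · have hkve : kv = e := pv_eq_of_fst_nodup pvTable_fst_nodup hkv he heq.symm
        subst hkve
        rcases l₁.any (fun e' => e'.1 == kv.1) <;> simp [hf]
      · have h2 : (e.1 == kv.1) = false := by simp [heq]
        rw [h2, Bool.false_or]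
        simp [Ne.symm heq]

set_option maxRecDepth 40000 in
theorem pv_init_eq :
    PySem.Dict.ofList (pvTable.map (fun kv => (kv.1, (none : Option String))))
      = PySem.Dict.mk (pvTable.map (fun kv => (kv.1, (none : Option String)))) := by decide

-- ===== VERDICT (by name: the statement is the Claim_ definition above) =====
theorem resolve_columns_py_spec : Claim_equal_resolve_columns_py := by
  intro fieldnames _
  unfold Spec_resolve_columns_py resolve_columns_py resolve_columns_py_alt
  rw [pv_init_eq]
  conv_lhs => rw [pvA_loop fieldnames pvTable (fun _ => none) (fun _ h => h)]
  conv_rhs => rw [pvB_loop fieldnames (fun _ => none)]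
  refine congrArg PySem.Dict.items (congrArg PySem.Dict.mk (List.map_congr_left ?_))
  intro kv hkv
  have hany : pvTable.any (fun e => e.1 == kv.1) = true :=
    List.any_eq_true.mpr ⟨kv, hkv, by simp⟩
  simp [hany]
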